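-- pv_equiv track=rewrite | github.com/MarcinSzablak/matura-info | 2023/maj/zad_2_1.py | zad_2_1
-- ===== SOURCE A (Python) =====
-- def zad_2_1(x):
--     if x == 0:
--         return 1
--
--     z = 0
--     c = 0
--     counter = 0
--
--     while x > 0:
--         p = x % 2
--         if p == z:
--             c += 1
--         else:
--             c = 0
--             counter += 1
--         x //= 2
--         z = p
--
--     return counter
-- ===== SOURCE B (Python) =====
-- def zad_2_1(x):
--     if x == 0:
--         return 1
--     if x < 0:
--         return 0
--     # popcount of the Gray difference counts adjacent-bit transitions;
--     # the left shift adds one spurious top edge, hence the -1.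
--     return bin(x ^ (x << 1)).count('1') - 1
-- ===== Notes on version B (the rewrite author's own statement) =====
-- stated objective: simpler
-- what changed: Replaces A's bit-by-bit while loop (mod/div with a previous-bit register) by a single closed-form popcount of the Gray difference, bin(x ^ (x << 1)).count('1') minus one, with A's zero and negative corner values kept as explicit one-line guards.
import Mathlib
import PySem

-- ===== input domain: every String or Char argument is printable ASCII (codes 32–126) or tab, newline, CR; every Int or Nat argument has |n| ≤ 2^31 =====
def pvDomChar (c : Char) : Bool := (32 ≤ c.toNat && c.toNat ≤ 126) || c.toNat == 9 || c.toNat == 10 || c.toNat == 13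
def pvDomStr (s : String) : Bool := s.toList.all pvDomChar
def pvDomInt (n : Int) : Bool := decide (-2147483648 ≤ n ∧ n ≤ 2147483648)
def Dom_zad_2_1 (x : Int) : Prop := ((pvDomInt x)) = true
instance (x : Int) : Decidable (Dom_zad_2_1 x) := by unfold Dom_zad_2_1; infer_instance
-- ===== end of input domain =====

-- B replaces A's bit-by-bit while loop by a single popcount of the Gray difference
-- x ^ (x << 1) (objective: simpler, closed form instead of a loop); A's 0 and
-- negative corner values are kept as guards since the bit trick applies to x > 0.

-- ===== PORT A =====
-- the while loop of A: state (x, z, c, counter), branches in source order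
def zad21Loop (x z c counter : Int) : Int :=
  if x > 0 then
    let p := PySem.Int.mod x 2
    if p == z then
      zad21Loop (PySem.Int.floordiv x 2) p (c + 1) counter
    else
      zad21Loop (PySem.Int.floordiv x 2) p 0 (counter + 1)
  else counter
termination_by x.toNat
decreasing_by
  all_goals
    rw [PySem.Int.floordiv_eq_ediv_of_pos (by omega)]
    omega

def zad_2_1 (x : Int) : Int :=
  if x == 0 then 1
  else zad21Loop x 0 0 0

-- ===== PORT B =====
-- bin(m).count('1') = PySem.Int.bitCount m exactly: '-' and the '0b' prefix contain no '1';
-- x << 1 is Lean's x <<< 1; x ^ y is PySem.Int.bxor.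
def zad_2_1_alt (x : Int) : Int :=
  if x == 0 then 1
  else if x < 0 then 0
  else (PySem.Int.bitCount (PySem.Int.bxor x (x <<< (1 : Nat))) : Int) - 1

-- ===== PRECONDITION & SPEC =====
def Spec_zad_2_1 (x : Int) (out : Int) : Prop := out = zad_2_1_alt x
instance (x : Int) (out : Int) : Decidable (Spec_zad_2_1 x out) := by unfold Spec_zad_2_1; infer_instance

-- ===== CLAIM =====
def Claim_equal_zad_2_1 : Prop := ∀ (x : Int), Dom_zad_2_1 x → Spec_zad_2_1 x (zad_2_1 x)

-- ===== LEMMAS AND PROOFS =====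

-- popcount on Nat (proof-side model of bitCount)
def pc (n : Nat) : Nat :=
  if n = 0 then 0 else n % 2 + pc (n / 2)
decreasing_by omega

-- transition count of the bit string of n read LSB-first, starting from previous bit z
def tN (n z : Nat) : Nat :=
  if n = 0 then 0 else (if n % 2 = z then 0 else 1) + tN (n / 2) (n % 2)
decreasing_by omega

theorem pc_bit (u v : Nat) (hv : v < 2) : pc (2 * u + v) = v + pc u := by
  rcases Nat.eq_zero_or_pos u with hu | hu
  · subst hu; interval_cases v <;> simp [pc]
  · conv_lhs => rw [pc]
    rw [if_neg (by omega), (by omega : (2 * u + v) % 2 = v), (by omega : (2 * u + v) / 2 = u)]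

theorem xor2 (u v a b : Nat) (ha : a < 2) (hb : b < 2) :
    (2 * u + a) ^^^ (2 * v + b) = 2 * (u ^^^ v) + (a ^^^ b) := by
  interval_cases a <;> interval_cases b
  · simpa [Nat.bit_val] using Nat.xor_bit false u false v
  · simpa [Nat.bit_val] using Nat.xor_bit false u true v
  · simpa [Nat.bit_val] using Nat.xor_bit true u false v
  · simpa [Nat.bit_val] using Nat.xor_bit true u true v

theorem xor_lt_two (a b : Nat) (ha : a < 2) (hb : b < 2) : a ^^^ b < 2 := by
  interval_cases a <;> interval_cases b <;> decide

theorem bitCount_eq_pc (m : Nat) : PySem.Int.bitCount (m : Int) = pc m := by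
  induction m using Nat.strong_induction_on with
  | _ m ih =>
    rcases Nat.eq_zero_or_pos m with hm | hm
    · subst hm; simp [pc, PySem.Int.bitCount_zero]
    · rw [PySem.Int.bitCount_natCast hm, ih (m / 2) (by omega)]
      conv_rhs => rw [pc]
      rw [if_neg (by omega)]

-- pc ((2n+z) ^^^ n) counts the transitions of z,bits(n) plus the one spurious top edge
theorem pcF (n : Nat) : ∀ z, z < 2 →
    pc ((2 * n + z) ^^^ n) = tN n z + (if n = 0 then z else 1) := by
  induction n using Nat.strong_induction_on with
  | _ n ih =>
    intro z hz
    rcases Nat.eq_zero_or_pos n with hn | hn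
    · subst hn
      simp only [Nat.mul_zero, Nat.zero_add, Nat.xor_zero]
      rw [tN]
      interval_cases z <;> simp [pc]
    · have hb : n % 2 < 2 := by omega
      have hzb : z ^^^ n % 2 < 2 := xor_lt_two _ _ hz hb
      have key : pc ((2 * n + z) ^^^ n)
          = (z ^^^ n % 2) + pc ((2 * (n / 2) + n % 2) ^^^ (n / 2)) := by
        conv_lhs => rw [show n = 2 * (n / 2) + n % 2 by omega]
        rw [xor2 (2 * (n / 2) + n % 2) (n / 2) z (n % 2) hz hb, pc_bit _ _ hzb]
      have e1 : tN n z = (if n % 2 = z then 0 else 1) + tN (n / 2) (n % 2) := by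
        conv_lhs => rw [tN]
        rw [if_neg (by omega)]
      have hx : z ^^^ n % 2 = if n % 2 = z then 0 else 1 := by
        rcases (by omega : n % 2 = 0 ∨ n % 2 = 1) with h | h <;>
          rw [h] <;> interval_cases z <;> decide
      have h2 : (if n / 2 = 0 then n % 2 else 1) = 1 := by
        by_cases hm : n / 2 = 0
        · rw [if_pos hm]; omega
        · rw [if_neg hm]
      rw [key, ih (n / 2) (by omega) (n % 2) hb, h2, e1, hx,
        if_neg (show ¬ n = 0 by omega)]
      omega

theorem loop_eq (n : Nat) : ∀ (z : Nat), z < 2 → ∀ (c counter : Int),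
    zad21Loop (n : Int) (z : Int) c counter = counter + tN n z := by
  induction n using Nat.strong_induction_on with
  | _ n ih =>
    intro z hz c counter
    rcases Nat.eq_zero_or_pos n with hn | hn
    · subst hn
      rw [zad21Loop, if_neg (by omega), tN]
      simp
    · have hmod : PySem.Int.mod (n : Int) 2 = ((n % 2 : Nat) : Int) := by
        exact_mod_cast PySem.Int.mod_natCast n 2
      have hdiv : PySem.Int.floordiv (n : Int) 2 = ((n / 2 : Nat) : Int) := by
        exact_mod_cast PySem.Int.floordiv_natCast n 2
      rw [zad21Loop, if_pos (by exact_mod_cast hn)]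
      rw [hmod, hdiv]
      conv_rhs => rw [tN, if_neg (by omega)]
      by_cases hzz : n % 2 = z
      · rw [if_pos (by simp only [beq_iff_eq]; exact_mod_cast hzz),
          ih (n / 2) (by omega) (n % 2) (by omega) (c + 1) counter, if_pos hzz]
        push_cast; ring
      · rw [if_neg (by
            simp only [beq_iff_eq]
            exact fun he => hzz (by exact_mod_cast he)),
          ih (n / 2) (by omega) (n % 2) (by omega) 0 (counter + 1), if_neg hzz]
        push_cast; ring

-- A on any x < 0: the while loop never runs
theorem a_neg (x : Int) (hx : x < 0) : zad_2_1 x = 0 := by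
  rw [zad_2_1, if_neg (by simp only [beq_iff_eq]; omega), zad21Loop, if_neg (by omega)]

-- A = B on positive x
theorem pos_eq (n : Nat) (hn : 0 < n) : zad_2_1 (n : Int) = zad_2_1_alt (n : Int) := by
  have hsh : ((n : Int)) <<< (1 : Nat) = ((2 * n : Nat) : Int) := by
    show Int.ofNat (n <<< 1) = Int.ofNat (2 * n)
    congr 1
  have hne : ¬(((n : Int)) == 0) = true := by
    simp only [beq_iff_eq]
    exact_mod_cast (by omega : ¬ n = 0)
  have hl : zad21Loop (n : Int) 0 0 0 = 0 + ((tN n 0 : Nat) : Int) := by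
    simpa using loop_eq n 0 (by omega) 0 0
  rw [zad_2_1, if_neg hne, hl,
    zad_2_1_alt, if_neg hne, if_neg (by omega),
    hsh, PySem.Int.bxor_natCast, bitCount_eq_pc]
  have hpc : pc (n ^^^ 2 * n) = tN n 0 + 1 := by
    rw [Nat.xor_comm, show 2 * n = 2 * n + 0 by omega, pcF n 0 (by omega), if_neg (by omega)]
  rw [hpc]
  push_cast; ring

-- ===== VERDICT =====
theorem zad_2_1_spec : Claim_equal_zad_2_1 := by
  intro x _
  unfold Spec_zad_2_1
  rcases lt_trichotomy x 0 with hx | hx | hx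
  · rw [a_neg x hx, zad_2_1_alt, if_neg (by simp only [beq_iff_eq]; omega), if_pos hx]
  · subst hx; rfl
  · obtain ⟨n, rfl⟩ : ∃ n : Nat, x = (n : Int) := ⟨x.toNat, by omega⟩
    exact pos_eq n (by exact_mod_cast hx)
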